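-- pv_equiv track=rewrite | github.com/djfeldman94/pitcher-projections | app/app.py | categorize_columns
-- ===== SOURCE A (Python) =====
-- FEATURE_CATEGORIES = {
--     "Traditional / General": lambda c: not any(tag in c for tag in ["(sc)", "(pi)", "bot", "Stf+", "Loc+", "Pit+"]) and "+" not in c,
--     "Statcast Pitch Data": lambda c: "(sc)" in c,
--     "PitchInfo Pitch Data": lambda c: "(pi)" in c,
--     "Plus Stats (park-adjusted)": lambda c: "+" in c and "(sc)" not in c and "(pi)" not in c and not any(c.startswith(p) for p in ["Stf+", "Loc+", "Pit+"]),
--     "Stuff+ / Location+ / Pitching+": lambda c: any(c.startswith(p) for p in ["Stf+", "Loc+", "Pit+", "Stuff+", "Location+", "Pitching+"]),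
--     "Botball Models": lambda c: c.lower().startswith("bot"),
-- }
--
-- def categorize_columns(columns: list[str]) -> dict[str, list[str]]:
--     """Sort columns into display categories."""
--     cats = {name: [] for name in FEATURE_CATEGORIES}
--     for col in columns:
--         placed = False
--         for cat_name in ["Statcast Pitch Data", "PitchInfo Pitch Data",
--                          "Stuff+ / Location+ / Pitching+", "Botball Models",
--                          "Plus Stats (park-adjusted)"]:
--             if FEATURE_CATEGORIES[cat_name](col):
--                 cats[cat_name].append(col)
--                 placed = True
--                 break
--         if not placed:
--             cats["Traditional / General"].append(col)
--     return {k: sorted(v) for k, v in cats.items() if v}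
-- ===== SOURCE B (Python) =====
-- _DISPLAY_ORDER = ["Traditional / General", "Statcast Pitch Data", "PitchInfo Pitch Data",
--                   "Plus Stats (park-adjusted)", "Stuff+ / Location+ / Pitching+", "Botball Models"]
--
-- _SIEVE = [
--     ("Statcast Pitch Data", lambda c: "(sc)" in c),
--     ("PitchInfo Pitch Data", lambda c: "(pi)" in c),
--     ("Stuff+ / Location+ / Pitching+",
--      lambda c: c.startswith(("Stf+", "Loc+", "Pit+", "Stuff+", "Location+", "Pitching+"))),
--     ("Botball Models", lambda c: c.lower().startswith("bot")),
--     ("Plus Stats (park-adjusted)", lambda c: "+" in c),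
-- ]
--
--
-- def categorize_columns(columns: list[str]) -> dict[str, list[str]]:
--     """Sort columns into display categories."""
--     remaining = sorted(columns)
--     buckets = {}
--     for name, pred in _SIEVE:
--         buckets[name] = [c for c in remaining if pred(c)]
--         remaining = [c for c in remaining if not pred(c)]
--     buckets["Traditional / General"] = remaining
--     return {k: buckets[k] for k in _DISPLAY_ORDER if buckets[k]}
-- ===== Notes on version B (the rewrite author's own statement) =====
-- stated objective: alternative
-- what changed: B replaces A's per-column first-match classification (placed flag, per-bucket sorts) by a category-major sieve: it sorts the input once, then for each priority category in turn filters the matching columns out of a shrinking remainder list, the leftover becoming the Traditional bucket; empty buckets are dropped in a final display-order comprehension.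
import Mathlib
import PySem

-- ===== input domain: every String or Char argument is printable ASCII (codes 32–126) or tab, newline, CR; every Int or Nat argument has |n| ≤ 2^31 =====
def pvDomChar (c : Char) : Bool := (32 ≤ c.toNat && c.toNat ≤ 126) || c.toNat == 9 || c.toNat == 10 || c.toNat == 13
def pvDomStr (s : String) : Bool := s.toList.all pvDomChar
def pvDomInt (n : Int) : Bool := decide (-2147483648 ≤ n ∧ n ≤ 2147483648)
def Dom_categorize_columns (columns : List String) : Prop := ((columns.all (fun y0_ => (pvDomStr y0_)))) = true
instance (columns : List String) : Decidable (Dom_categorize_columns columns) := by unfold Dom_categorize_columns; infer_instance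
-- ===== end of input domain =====

-- B replaces A's per-column first-match classification by a category-major sieve over a once-sorted
-- shrinking remainder list; objective: alternative (same cost). Proven equal to A on every input.

-- ===== PORT A =====
-- FEATURE_CATEGORIES: dict of name → lambda; ported as the key list plus a name-indexed predicate.
def FEATURE_CATEGORIES_keys : List String :=
  ["Traditional / General", "Statcast Pitch Data", "PitchInfo Pitch Data",
   "Plus Stats (park-adjusted)", "Stuff+ / Location+ / Pitching+", "Botball Models"]

def FEATURE_CATEGORIES_pred (name : String) (c : String) : Bool :=
  if name = "Traditional / General" then
    !(["(sc)", "(pi)", "bot", "Stf+", "Loc+", "Pit+"].any (fun tag => PySem.Str.isIn tag c))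
      && !PySem.Str.isIn "+" c
  else if name = "Statcast Pitch Data" then PySem.Str.isIn "(sc)" c
  else if name = "PitchInfo Pitch Data" then PySem.Str.isIn "(pi)" c
  else if name = "Plus Stats (park-adjusted)" then
    PySem.Str.isIn "+" c && !PySem.Str.isIn "(sc)" c && !PySem.Str.isIn "(pi)" c
      && !(["Stf+", "Loc+", "Pit+"].any (fun p => PySem.Str.startswith c p))
  else if name = "Stuff+ / Location+ / Pitching+" then
    ["Stf+", "Loc+", "Pit+", "Stuff+", "Location+", "Pitching+"].any (fun p => PySem.Str.startswith c p)
  else if name = "Botball Models" then PySem.Str.startswith (PySem.Str.lower c) "bot"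
  else false

-- inner 'for cat_name in [...]: if pred(col): …; break': the first matching name (none ↔ not placed)
def firstMatch (col : String) : List String → Option String
  | [] => none
  | n :: rest => if FEATURE_CATEGORIES_pred n col then some n else firstMatch col rest

def categorize_columns (columns : List String) : List (String × List String) :=
  let cats : PySem.Dict String (List String) :=
    PySem.Dict.ofList (FEATURE_CATEGORIES_keys.map (fun name => (name, ([] : List String))))
  let cats := columns.foldl (fun cats col =>
    match firstMatch col ["Statcast Pitch Data", "PitchInfo Pitch Data",
                          "Stuff+ / Location+ / Pitching+", "Botball Models",
                          "Plus Stats (park-adjusted)"] with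
    | some cat_name => cats.modify cat_name [] (fun v => v ++ [col])
    | none => cats.modify "Traditional / General" [] (fun v => v ++ [col])) cats
  (cats.items.filter (fun kv => !kv.2.isEmpty)).map
    (fun kv => (kv.1, PySem.List.sorted kv.2 (fun x => x) false))

-- ===== PORT B =====
def DISPLAY_ORDER : List String :=
  ["Traditional / General", "Statcast Pitch Data", "PitchInfo Pitch Data",
   "Plus Stats (park-adjusted)", "Stuff+ / Location+ / Pitching+", "Botball Models"]

def SIEVE : List (String × (String → Bool)) :=
  [("Statcast Pitch Data", fun c => PySem.Str.isIn "(sc)" c),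
   ("PitchInfo Pitch Data", fun c => PySem.Str.isIn "(pi)" c),
   ("Stuff+ / Location+ / Pitching+", fun c =>
      ["Stf+", "Loc+", "Pit+", "Stuff+", "Location+", "Pitching+"].any
        (fun p => PySem.Str.startswith c p)),
   ("Botball Models", fun c => PySem.Str.startswith (PySem.Str.lower c) "bot"),
   ("Plus Stats (park-adjusted)", fun c => PySem.Str.isIn "+" c)]

def categorize_columns_alt (columns : List String) : List (String × List String) :=
  let remaining := PySem.List.sorted columns (fun x => x) false
  -- 'for name, pred in _SIEVE: buckets[name] = [c for c in remaining if pred(c)]; remaining = [c for c in remaining if not pred(c)]'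
  let st := SIEVE.foldl
    (fun (st : PySem.Dict String (List String) × List String) np =>
      (st.1.insert np.1 (st.2.filter np.2), st.2.filter (fun c => !np.2 c)))
    (PySem.Dict.ofList [], remaining)
  -- 'buckets["Traditional / General"] = remaining'
  let buckets := st.1.insert "Traditional / General" st.2
  -- '{k: buckets[k] for k in _DISPLAY_ORDER if buckets[k]}'
  (DISPLAY_ORDER.filter (fun k => !(buckets.getD k []).isEmpty)).map
    (fun k => (k, buckets.getD k []))

-- ===== PRECONDITION & SPEC =====
def Spec_categorize_columns (columns : List String) (out : List (String × List String)) : Prop := out = categorize_columns_alt columns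
instance (columns : List String) (out : List (String × List String)) : Decidable (Spec_categorize_columns columns out) := by unfold Spec_categorize_columns; infer_instance

-- ===== CLAIM (what is proved, stated in full; the proofs are below) =====
def Claim_equal_categorize_columns : Prop := ∀ (columns : List String), Dom_categorize_columns columns → Spec_categorize_columns columns (categorize_columns columns)

-- ===== LEMMAS AND PROOFS =====

-- A's effective category of a column (first match of the inner loop, else Traditional)
def catA (c : String) : String :=
  (firstMatch c ["Statcast Pitch Data", "PitchInfo Pitch Data",
                 "Stuff+ / Location+ / Pitching+", "Botball Models",
                 "Plus Stats (park-adjusted)"]).getD "Traditional / General"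

lemma catA_mem (c : String) : catA c ∈ FEATURE_CATEGORIES_keys := by
  simp only [catA, firstMatch]
  split_ifs <;> decide

lemma sorted_filter (p : String → Bool) (xs : List String) :
    PySem.List.sorted (xs.filter p) (fun x => x) false
      = (PySem.List.sorted xs (fun x => x) false).filter p := by
  apply PySem.List.sorted_id_eq_of_perm_of_pairwise
  · exact (PySem.List.sorted_perm xs (fun x => x) false).filter p
  · exact (PySem.List.sorted_pairwise xs (fun x => x)).sublist List.filter_sublist

lemma sorted_isEmpty (xs : List String) :
    (PySem.List.sorted xs (fun x => x) false).isEmpty = xs.isEmpty := by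
  by_cases h : xs = []
  · subst h; decide
  · have hs : PySem.List.sorted xs (fun x => x) false ≠ [] := by
      simp [PySem.List.sorted_eq_nil_iff, h]
    rw [List.isEmpty_eq_false_iff.mpr h, List.isEmpty_eq_false_iff.mpr hs]

-- items of A's grouping fold over the fixed six-key dict
lemma items_fold (cat : String → String) (hmem : ∀ c, cat c ∈ FEATURE_CATEGORIES_keys)
    (cols : List String) :
    (cols.foldl (fun d c => d.modify (cat c) [] (fun v => v ++ [c]))
        (PySem.Dict.ofList (FEATURE_CATEGORIES_keys.map (fun name => (name, ([] : List String)))))).items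
      = FEATURE_CATEGORIES_keys.map (fun k => (k, cols.filter (fun c => cat c == k))) := by
  set d0 : PySem.Dict String (List String) :=
    PySem.Dict.ofList (FEATURE_CATEGORIES_keys.map (fun name => (name, ([] : List String)))) with hd0
  have h0 : d0.keys = FEATURE_CATEGORIES_keys := by rw [hd0]; decide
  have hkeys : (cols.foldl (fun d c => d.modify (cat c) [] (fun v => v ++ [c])) d0).keys
      = FEATURE_CATEGORIES_keys := by
    rw [PySem.Dict.keys_foldl_modify_key, h0, PySem.Set.update_eq_append_filter]
    have hnil : ((PySem.Set.ofList (cols.map cat)).filter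
        (fun y => !(PySem.Set.contains FEATURE_CATEGORIES_keys y))) = [] := by
      rw [List.filter_eq_nil_iff]
      intro y hy
      obtain ⟨c, _, rfl⟩ := List.mem_map.mp ((PySem.Set.mem_ofList _ _).mp hy)
      simp [hmem c]
    rw [hnil, List.append_nil]
  have hnodup : (cols.foldl (fun d c => d.modify (cat c) [] (fun v => v ++ [c])) d0).keys.Nodup := by
    rw [hkeys]; decide
  rw [PySem.Dict.items_eq_map_keys _ hnodup [], hkeys]
  apply List.map_congr_left
  intro k hk
  have hfold : cols.foldl (fun d c => d.modify (cat c) [] (fun v => v ++ [c])) d0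
      = (cols.map (fun c => (cat c, c))).foldl (fun d p => d.modify p.1 [] (fun v => v ++ [p.2])) d0 := by
    rw [List.foldl_map]
  have hinit : d0.getD k [] = [] := by
    fin_cases hk <;> (rw [hd0]; decide)
  rw [hfold, PySem.Dict.getD_foldl_modify_append, hinit, List.nil_append,
      List.filter_map, List.map_map]
  simp [Function.comp_def]

-- filter-then-map through an indexing map
lemma filter_map_map {α β γ : Type} (l : List α) (f : α → β) (g : β → γ) (p : β → Bool)
    (q : α → Bool) (h : α → γ) (hq : ∀ x ∈ l, p (f x) = q x) (hh : ∀ x ∈ l, g (f x) = h x) :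
    ((l.map f).filter p).map g = (l.filter q).map h := by
  rw [List.filter_map, List.map_map]
  rw [List.filter_congr (by intro x hx; simpa using hq x hx)]
  exact List.map_congr_left (fun x hx => hh x (List.mem_filter.mp hx).1)

-- A in canonical form: over the six keys, the catA-filtered sorted input, empty buckets dropped
lemma A_canon (cols : List String) :
    categorize_columns cols
      = (FEATURE_CATEGORIES_keys.filter
            (fun k => !((PySem.List.sorted cols (fun x => x) false).filter
                          (fun c => catA c == k)).isEmpty)).map
          (fun k => (k, (PySem.List.sorted cols (fun x => x) false).filter
                          (fun c => catA c == k))) := by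
  unfold categorize_columns
  dsimp only
  have hbodyA : (fun (cats : PySem.Dict String (List String)) col =>
      match firstMatch col ["Statcast Pitch Data", "PitchInfo Pitch Data",
                            "Stuff+ / Location+ / Pitching+", "Botball Models",
                            "Plus Stats (park-adjusted)"] with
      | some cat_name => cats.modify cat_name [] (fun v => v ++ [col])
      | none => cats.modify "Traditional / General" [] (fun v => v ++ [col]))
      = fun cats col => cats.modify (catA col) [] (fun v => v ++ [col]) := by
    funext cats col
    cases h : firstMatch col ["Statcast Pitch Data", "PitchInfo Pitch Data",
                              "Stuff+ / Location+ / Pitching+", "Botball Models",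
                              "Plus Stats (park-adjusted)"] <;> simp [catA, h]
  rw [hbodyA, items_fold catA catA_mem]
  apply filter_map_map
  · intro k _
    dsimp only
    rw [← sorted_filter, sorted_isEmpty]
  · intro k _
    dsimp only
    rw [← sorted_filter]

-- the sieve predicates, named for the proofs
def pSC (c : String) : Bool := PySem.Str.isIn "(sc)" c
def pPI (c : String) : Bool := PySem.Str.isIn "(pi)" c
def pStf (c : String) : Bool :=
  ["Stf+", "Loc+", "Pit+", "Stuff+", "Location+", "Pitching+"].any
    (fun p => PySem.Str.startswith c p)
def pBot (c : String) : Bool := PySem.Str.startswith (PySem.Str.lower c) "bot"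
def pPlus (c : String) : Bool := PySem.Str.isIn "+" c

-- pointwise: each stage of the sieve selects exactly the columns whose first match in A is that category
set_option maxHeartbeats 1000000 in
lemma pt1 (c : String) : pSC c = (catA c == "Statcast Pitch Data") := by
  simp [pSC, catA, firstMatch, FEATURE_CATEGORIES_pred]
  split_ifs <;> simp_all

set_option maxHeartbeats 1000000 in
lemma pt2 (c : String) : (pPI c && !pSC c) = (catA c == "PitchInfo Pitch Data") := by
  simp [pSC, pPI, catA, firstMatch, FEATURE_CATEGORIES_pred]
  split_ifs <;> simp_all

set_option maxHeartbeats 1000000 in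
lemma pt3 (c : String) : (pStf c && (!pPI c && !pSC c)) = (catA c == "Stuff+ / Location+ / Pitching+") := by
  simp [pSC, pPI, pStf, catA, firstMatch, FEATURE_CATEGORIES_pred]
  split_ifs <;> simp_all

set_option maxHeartbeats 1000000 in
lemma pt4 (c : String) : (pBot c && (!pStf c && (!pPI c && !pSC c))) = (catA c == "Botball Models") := by
  simp [pSC, pPI, pStf, pBot, catA, firstMatch, FEATURE_CATEGORIES_pred]
  split_ifs <;> simp_all <;> intros <;> simp_all

set_option maxHeartbeats 1000000 in
lemma pt5 (c : String) :
    (pPlus c && (!pBot c && (!pStf c && (!pPI c && !pSC c)))) = (catA c == "Plus Stats (park-adjusted)") := by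
  simp [pSC, pPI, pStf, pBot, pPlus, catA, firstMatch, FEATURE_CATEGORIES_pred]
  split_ifs <;> simp_all <;> intros <;> simp_all

set_option maxHeartbeats 1000000 in
lemma pt6 (c : String) :
    (!pPlus c && (!pBot c && (!pStf c && (!pPI c && !pSC c)))) = (catA c == "Traditional / General") := by
  simp [pSC, pPI, pStf, pBot, pPlus, catA, firstMatch, FEATURE_CATEGORIES_pred]
  split_ifs <;> simp_all <;> intros <;> simp_all

-- B in the same canonical form
lemma B_canon (cols : List String) :
    categorize_columns_alt cols
      = (FEATURE_CATEGORIES_keys.filter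
            (fun k => !((PySem.List.sorted cols (fun x => x) false).filter
                          (fun c => catA c == k)).isEmpty)).map
          (fun k => (k, (PySem.List.sorted cols (fun x => x) false).filter
                          (fun c => catA c == k))) := by
  set S := PySem.List.sorted cols (fun x => x) false with hS
  have hB : categorize_columns_alt cols
      = (DISPLAY_ORDER.filter (fun k =>
            !((((((((PySem.Dict.ofList ([] : List (String × List String))).insert
            "Statcast Pitch Data" (S.filter pSC)).insert
            "PitchInfo Pitch Data" ((S.filter (fun c => !pSC c)).filter pPI)).insert
            "Stuff+ / Location+ / Pitching+"
              (((S.filter (fun c => !pSC c)).filter (fun c => !pPI c)).filter pStf)).insert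
            "Botball Models"
              ((((S.filter (fun c => !pSC c)).filter (fun c => !pPI c)).filter (fun c => !pStf c)).filter pBot)).insert
            "Plus Stats (park-adjusted)"
              (((((S.filter (fun c => !pSC c)).filter (fun c => !pPI c)).filter (fun c => !pStf c)).filter (fun c => !pBot c)).filter pPlus)).insert
            "Traditional / General"
              (((((S.filter (fun c => !pSC c)).filter (fun c => !pPI c)).filter (fun c => !pStf c)).filter (fun c => !pBot c)).filter (fun c => !pPlus c))).getD k []).isEmpty)).map
          (fun k => (k, (((((((PySem.Dict.ofList ([] : List (String × List String))).insert
            "Statcast Pitch Data" (S.filter pSC)).insert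
            "PitchInfo Pitch Data" ((S.filter (fun c => !pSC c)).filter pPI)).insert
            "Stuff+ / Location+ / Pitching+"
              (((S.filter (fun c => !pSC c)).filter (fun c => !pPI c)).filter pStf)).insert
            "Botball Models"
              ((((S.filter (fun c => !pSC c)).filter (fun c => !pPI c)).filter (fun c => !pStf c)).filter pBot)).insert
            "Plus Stats (park-adjusted)"
              (((((S.filter (fun c => !pSC c)).filter (fun c => !pPI c)).filter (fun c => !pStf c)).filter (fun c => !pBot c)).filter pPlus)).insert
            "Traditional / General"
              (((((S.filter (fun c => !pSC c)).filter (fun c => !pPI c)).filter (fun c => !pStf c)).filter (fun c => !pBot c)).filter (fun c => !pPlus c))).getD k [])) := rfl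
  have hgetD : ∀ k ∈ DISPLAY_ORDER,
      (((((((PySem.Dict.ofList ([] : List (String × List String))).insert
            "Statcast Pitch Data" (S.filter pSC)).insert
            "PitchInfo Pitch Data" ((S.filter (fun c => !pSC c)).filter pPI)).insert
            "Stuff+ / Location+ / Pitching+"
              (((S.filter (fun c => !pSC c)).filter (fun c => !pPI c)).filter pStf)).insert
            "Botball Models"
              ((((S.filter (fun c => !pSC c)).filter (fun c => !pPI c)).filter (fun c => !pStf c)).filter pBot)).insert
            "Plus Stats (park-adjusted)"
              (((((S.filter (fun c => !pSC c)).filter (fun c => !pPI c)).filter (fun c => !pStf c)).filter (fun c => !pBot c)).filter pPlus)).insert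
            "Traditional / General"
              (((((S.filter (fun c => !pSC c)).filter (fun c => !pPI c)).filter (fun c => !pStf c)).filter (fun c => !pBot c)).filter (fun c => !pPlus c))).getD k [] = S.filter (fun c => catA c == k) := by
    intro k hk
    fin_cases hk
    · simp only [PySem.Dict.getD_insert, reduceIte, List.filter_filter]
      exact List.filter_congr (fun c _ => pt6 c)
    · simp only [PySem.Dict.getD_insert, reduceIte, List.filter_filter]
      exact List.filter_congr (fun c _ => pt1 c)
    · simp only [PySem.Dict.getD_insert, reduceIte, List.filter_filter]
      exact List.filter_congr (fun c _ => pt2 c)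
    · simp only [PySem.Dict.getD_insert, reduceIte, List.filter_filter]
      exact List.filter_congr (fun c _ => pt5 c)
    · simp only [PySem.Dict.getD_insert, reduceIte, List.filter_filter]
      exact List.filter_congr (fun c _ => pt3 c)
    · simp only [PySem.Dict.getD_insert, reduceIte, List.filter_filter]
      exact List.filter_congr (fun c _ => pt4 c)
  rw [hB]
  have hfe : DISPLAY_ORDER.filter (fun k => !((((((((PySem.Dict.ofList ([] : List (String × List String))).insert
            "Statcast Pitch Data" (S.filter pSC)).insert
            "PitchInfo Pitch Data" ((S.filter (fun c => !pSC c)).filter pPI)).insert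
            "Stuff+ / Location+ / Pitching+"
              (((S.filter (fun c => !pSC c)).filter (fun c => !pPI c)).filter pStf)).insert
            "Botball Models"
              ((((S.filter (fun c => !pSC c)).filter (fun c => !pPI c)).filter (fun c => !pStf c)).filter pBot)).insert
            "Plus Stats (park-adjusted)"
              (((((S.filter (fun c => !pSC c)).filter (fun c => !pPI c)).filter (fun c => !pStf c)).filter (fun c => !pBot c)).filter pPlus)).insert
            "Traditional / General"
              (((((S.filter (fun c => !pSC c)).filter (fun c => !pPI c)).filter (fun c => !pStf c)).filter (fun c => !pBot c)).filter (fun c => !pPlus c))).getD k []).isEmpty)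
      = DISPLAY_ORDER.filter (fun k => !(S.filter (fun c => catA c == k)).isEmpty) :=
    List.filter_congr (fun k hk => by rw [hgetD k hk])
  rw [hfe]
  exact List.map_congr_left (fun k hk => by
    rw [hgetD k (List.mem_filter.mp hk).1])

-- ===== VERDICT (by name: the statement is the Claim_ definition above) =====
theorem categorize_columns_spec : Claim_equal_categorize_columns := by
  intro cols _
  unfold Spec_categorize_columns
  rw [A_canon, B_canon]
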